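-- pv_equiv track=rewrite | github.com/JoshuaDuq/eegfmri-pipeline | eeg_pipeline/plotting/behavioral/dose_response.py | _present_feature_categories
-- ===== SOURCE A (Python) =====
-- from typing import Any, Iterable, Optional
--
-- def _present_feature_categories(columns: Iterable[str]) -> list[str]:
--     cats: set[str] = set()
--     for col in columns:
--         s = str(col)
--         if "_" not in s:
--             continue
--         cats.add(s.split("_", 1)[0])
--     return sorted(cats)
-- ===== SOURCE B (Python) =====
-- def _present_feature_categories(columns):
--     # Maintain a sorted, duplicate-free list throughout: each prefix is
--     # inserted at its ordered position (or skipped if already present),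
--     # so no set and no final sort are needed.
--     cats = []
--     for col in columns:
--         s = str(col)
--         if "_" not in s:
--             continue
--         p = s.split("_", 1)[0]
--         i = 0
--         while i < len(cats) and cats[i] < p:
--             i += 1
--         if i < len(cats) and cats[i] == p:
--             continue
--         cats = cats[:i] + [p] + cats[i:]
--     return cats
-- ===== Notes on version B (the rewrite author's own statement) =====
-- stated objective: alternative
-- what changed: Instead of accumulating prefixes in a hash set and sorting once at the end, B maintains a sorted duplicate-free list throughout, inserting each prefix at its ordered position (online insertion with a linear scan) and returning the list with no final sort.
import Mathlib
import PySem

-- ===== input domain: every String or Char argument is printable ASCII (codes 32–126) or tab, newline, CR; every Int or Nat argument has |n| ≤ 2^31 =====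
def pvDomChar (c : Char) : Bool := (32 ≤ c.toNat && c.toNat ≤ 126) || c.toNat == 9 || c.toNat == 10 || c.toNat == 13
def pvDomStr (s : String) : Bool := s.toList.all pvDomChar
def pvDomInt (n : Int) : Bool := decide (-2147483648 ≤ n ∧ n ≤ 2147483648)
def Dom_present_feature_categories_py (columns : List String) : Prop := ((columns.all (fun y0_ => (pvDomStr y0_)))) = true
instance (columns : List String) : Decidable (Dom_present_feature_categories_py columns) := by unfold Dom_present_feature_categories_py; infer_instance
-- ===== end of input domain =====

-- B keeps a sorted duplicate-free list at all times, inserting each prefix at its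
-- ordered position (online insertion), instead of A's set accumulator sorted at the
-- end; alternative structure, same result.

-- ===== PORT A =====
-- s.split("_", 1)[0]  (split with a nonempty separator always yields a nonempty list)
def pvPrefix (s : String) : String :=
  ((PySem.Str.splitMax? s "_" 1).getD []).headD ""

def present_feature_categories_py (columns : List String) : List String :=
  let cats : PySem.Set String :=
    columns.foldl (fun cats col =>
      if PySem.Str.isIn "_" col then PySem.Set.add cats (pvPrefix col) else cats)
      PySem.Set.empty
  PySem.List.sorted cats (fun x => x) false

-- ===== PORT B =====
-- while i < len(cats) and cats[i] < p: i += 1   (cats[i] with 0 ≤ i < len: exact as getD)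
def pvFindIdx (p : String) (cats : List String) (i : Nat) : Nat :=
  if i < cats.length ∧ cats.getD i "" < p then pvFindIdx p cats (i + 1) else i
termination_by cats.length - i
decreasing_by omega

-- the body of B's column loop after computing p: scan for i, skip if present,
-- else cats[:i] + [p] + cats[i:]  (nonnegative in-range slices: exact as take/drop)
def pvInsertSorted (cats : List String) (p : String) : List String :=
  let i := pvFindIdx p cats 0
  if i < cats.length ∧ cats.getD i "" = p then cats
  else cats.take i ++ [p] ++ cats.drop i

def present_feature_categories_py_alt (columns : List String) : List String :=
  columns.foldl (fun cats col =>
    if PySem.Str.isIn "_" col then pvInsertSorted cats (pvPrefix col) else cats) []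

-- ===== PRECONDITION & SPEC =====
def Spec_present_feature_categories_py (columns : List String) (out : List String) : Prop := out = present_feature_categories_py_alt columns
instance (columns : List String) (out : List String) : Decidable (Spec_present_feature_categories_py columns out) := by unfold Spec_present_feature_categories_py; infer_instance

-- ===== CLAIM =====
def Claim_equal_present_feature_categories_py : Prop := ∀ (columns : List String), Dom_present_feature_categories_py columns → Spec_present_feature_categories_py columns (present_feature_categories_py columns)

-- ===== LEMMAS AND PROOFS =====

-- the list of prefixes both folds traverse
def pvPrefList (columns : List String) : List String :=
  (columns.filter (fun c => PySem.Str.isIn "_" c)).map pvPrefix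

-- structural characterisation of B's while-loop insert, used only in the proofs
def pvIns (p : String) : List String → List String
  | [] => [p]
  | x :: t => if x < p then x :: pvIns p t else if x = p then x :: t else p :: x :: t

lemma pvFindIdx_eq (p : String) (cats : List String) (i : Nat) :
    pvFindIdx p cats i =
      if i < cats.length ∧ cats.getD i "" < p then pvFindIdx p cats (i + 1) else i := by
  rw [pvFindIdx]

theorem pvFindIdx_shift (p x : String) (t : List String) (i : Nat) :
    pvFindIdx p (x :: t) (i + 1) = pvFindIdx p t i + 1 := by
  induction hn : t.length - i using Nat.strong_induction_on generalizing i with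
  | _ n ih =>
    rw [pvFindIdx_eq p (x :: t), pvFindIdx_eq p t]
    rw [List.length_cons, List.getD_cons_succ]
    by_cases h : i < t.length ∧ t.getD i "" < p
    · rw [if_pos ⟨by omega, h.2⟩, if_pos h]
      exact ih (t.length - (i + 1)) (by omega) (i + 1) rfl
    · rw [if_neg (fun hc => h ⟨by omega, hc.2⟩), if_neg h]

theorem pvInsertSorted_eq_ins : ∀ (cats : List String) (p : String),
    pvInsertSorted cats p = pvIns p cats
  | [], p => by
    rw [pvInsertSorted, pvFindIdx_eq]
    simp [pvIns]
  | x :: t, p => by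
    rw [pvInsertSorted]
    by_cases hx : x < p
    · have h0 : pvFindIdx p (x :: t) 0 = pvFindIdx p t 0 + 1 := by
        rw [pvFindIdx_eq]
        rw [if_pos ⟨Nat.succ_pos _, by rw [List.getD_cons_zero]; exact hx⟩]
        exact pvFindIdx_shift p x t 0
      rw [h0]
      have ih := pvInsertSorted_eq_ins t p
      rw [pvInsertSorted] at ih
      simp only [pvIns, if_pos hx]
      rw [List.length_cons, List.getD_cons_succ]
      by_cases hc : pvFindIdx p t 0 < t.length ∧ t.getD (pvFindIdx p t 0) "" = p
      · rw [if_pos ⟨Nat.add_lt_add_right hc.1 1, hc.2⟩]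
        rw [if_pos hc] at ih
        rw [← ih]
      · rw [if_neg (fun hcc => hc ⟨by omega, hcc.2⟩)]
        rw [if_neg hc] at ih
        rw [← ih]
        rw [List.take_succ_cons, List.drop_succ_cons]
        simp
    · have h0 : pvFindIdx p (x :: t) 0 = 0 := by
        rw [pvFindIdx_eq]
        exact if_neg (fun hc => hx (by rw [List.getD_cons_zero] at hc; exact hc.2))
      rw [h0]
      by_cases he : x = p
      · rw [if_pos ⟨Nat.succ_pos _, by rw [List.getD_cons_zero]; exact he⟩]
        simp only [pvIns, if_neg hx, if_pos he]
      · rw [if_neg (fun hc => he (by rw [List.getD_cons_zero] at hc; exact hc.2))]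
        simp only [pvIns, if_neg hx, if_neg he, List.take_zero, List.drop_zero,
          List.nil_append]
        rfl

theorem foldA_eq (columns : List String) (s : PySem.Set String) :
    columns.foldl (fun cats col =>
      if PySem.Str.isIn "_" col then PySem.Set.add cats (pvPrefix col) else cats) s
    = (pvPrefList columns).foldl PySem.Set.add s := by
  induction columns generalizing s with
  | nil => rfl
  | cons c t ih =>
    simp only [List.foldl_cons]
    rw [ih]
    by_cases h : PySem.Chars.isIn ['_'] c.toList = true <;>
      simp [PySem.Str.isIn, h, pvPrefList]

theorem foldB_eq (columns : List String) (acc : List String) :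
    columns.foldl (fun cats col =>
      if PySem.Str.isIn "_" col then pvInsertSorted cats (pvPrefix col) else cats) acc
    = (pvPrefList columns).foldl (fun cats p => pvIns p cats) acc := by
  induction columns generalizing acc with
  | nil => rfl
  | cons c t ih =>
    simp only [List.foldl_cons]
    rw [ih]
    by_cases h : PySem.Chars.isIn ['_'] c.toList = true <;>
      simp [PySem.Str.isIn, h, pvPrefList, pvInsertSorted_eq_ins]

theorem mem_pvIns (a p : String) : ∀ (l : List String), a ∈ pvIns p l ↔ a = p ∨ a ∈ l
  | [] => by simp only [pvIns, List.mem_singleton, List.not_mem_nil, or_false]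
  | x :: t => by
    by_cases h1 : x < p
    · simp only [pvIns, if_pos h1, List.mem_cons, mem_pvIns a p t]
      tauto
    · by_cases h2 : x = p
      · subst h2
        simp only [pvIns, if_neg h1, if_true, List.mem_cons]
        tauto
      · simp only [pvIns, if_neg h1, if_neg h2, List.mem_cons]

theorem pvIns_pairwise (p : String) : ∀ (l : List String),
    l.Pairwise (fun a b => a < b) → (pvIns p l).Pairwise (fun a b => a < b)
  | [], _ => by simp only [pvIns]; exact List.pairwise_singleton _ _
  | x :: t, h => by
    obtain ⟨hx, ht⟩ := List.pairwise_cons.mp h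
    by_cases h1 : x < p
    · simp only [pvIns, if_pos h1]
      refine List.pairwise_cons.mpr ⟨?_, pvIns_pairwise p t ht⟩
      intro a ha
      rcases (mem_pvIns a p t).mp ha with rfl | ha'
      · exact h1
      · exact hx a ha'
    · by_cases h2 : x = p
      · simp only [pvIns, if_neg h1, if_pos h2]
        exact h
      · have hpx : p < x := lt_of_le_of_ne (not_lt.mp h1) (fun e => h2 e.symm)
        simp only [pvIns, if_neg h1, if_neg h2]
        refine List.pairwise_cons.mpr ⟨?_, h⟩
        intro a ha
        rcases List.mem_cons.mp ha with rfl | ha'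
        · exact hpx
        · exact lt_trans hpx (hx a ha')

theorem mem_foldIns (a : String) (L : List String) : ∀ (acc : List String),
    (a ∈ L.foldl (fun cats p => pvIns p cats) acc ↔ a ∈ acc ∨ a ∈ L) := by
  induction L with
  | nil => simp
  | cons p t ih =>
    intro acc
    simp only [List.foldl_cons, ih, mem_pvIns, List.mem_cons]
    tauto

theorem foldIns_pairwise (L : List String) : ∀ (acc : List String),
    acc.Pairwise (fun a b => a < b) →
    (L.foldl (fun cats p => pvIns p cats) acc).Pairwise (fun a b => a < b) := by
  induction L with
  | nil => exact fun _ h => h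
  | cons p t ih => exact fun acc h => ih _ (pvIns_pairwise p acc h)

-- ===== VERDICT =====
theorem present_feature_categories_py_spec : Claim_equal_present_feature_categories_py := by
  intro columns _
  unfold Spec_present_feature_categories_py present_feature_categories_py present_feature_categories_py_alt
  rw [foldA_eq, foldB_eq]
  set L := pvPrefList columns with hL
  rw [show L.foldl PySem.Set.add PySem.Set.empty = PySem.Set.ofList L from
        (PySem.Set.ofList_eq_foldl L).symm]
  have hpw := foldIns_pairwise L [] (by simp)
  refine PySem.List.sorted_eq_of_perm_of_pairwise_lt _ _ _ ?_ hpw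
  apply List.perm_of_nodup_nodup_toFinset_eq
  · exact hpw.nodup
  · exact PySem.Set.nodup_ofList L
  · ext a
    simp [mem_foldIns, PySem.Set.mem_ofList]
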